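-- pv_equiv track=rewrite | github.com/SandWithCheese/CryptoCTFTools | Cipher/caesar_box.py | caesar_box_encrypt
-- ===== SOURCE A (Python) =====
-- def caesar_box_encrypt(plaintext: str, column: int) -> str:
--     """
--     Performs caesar box cipher with a given column
--     """
--
--     if column == 1:
--         return plaintext
--
--     ciphertext = ""
--     for i in range(column):
--         idx = i
--         while idx < len(plaintext):
--             ciphertext += plaintext[idx]
--             idx += column
--
--     return ciphertext
-- ===== SOURCE B (Python) =====
-- def caesar_box_encrypt(plaintext: str, column: int) -> str:
--     """
--     Performs caesar box cipher with a given column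
--     (single forward scatter pass into column buckets).
--     """
--     if column < 1:
--         return ""
--     buckets = [""] * column
--     for i, ch in enumerate(plaintext):
--         buckets[i % column] += ch
--     return "".join(buckets)
-- ===== Notes on version B (the rewrite author's own statement) =====
-- stated objective: alternative
-- what changed: Replaced A's column-by-column strided gather (outer loop over residues, inner while jumping by `column`) with a single forward scatter pass that appends each character to bucket i % column and joins the buckets.
import Mathlib
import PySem

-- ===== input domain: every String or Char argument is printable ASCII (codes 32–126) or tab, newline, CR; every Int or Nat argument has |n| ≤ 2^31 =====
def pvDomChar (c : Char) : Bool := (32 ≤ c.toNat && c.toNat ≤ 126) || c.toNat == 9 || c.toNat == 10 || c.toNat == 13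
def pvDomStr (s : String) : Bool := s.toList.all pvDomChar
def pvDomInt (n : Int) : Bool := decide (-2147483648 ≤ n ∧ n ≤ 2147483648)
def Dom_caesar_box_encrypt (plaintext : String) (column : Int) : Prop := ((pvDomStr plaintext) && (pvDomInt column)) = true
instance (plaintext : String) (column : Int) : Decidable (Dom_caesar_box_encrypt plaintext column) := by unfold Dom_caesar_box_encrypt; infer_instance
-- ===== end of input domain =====

-- B replaces A's column-by-column strided gather by a single forward scatter pass into
-- `column` buckets joined at the end (objective: alternative decomposition, same cost).


-- ===== PORT A =====
-- A's inner `while idx < len(plaintext): ciphertext += plaintext[idx]; idx += column`.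
-- The `0 < col ∧ 0 ≤ idx` conjuncts are totality guards only: every call made by
-- `caesar_box_encrypt` satisfies them (idx starts in range(column), column ≥ 1 there).
def caesarGather (cs : List Char) (col : Int) (idx : Int) : List Char :=
  if _h : 0 < col ∧ 0 ≤ idx ∧ idx < (cs.length : Int) then
    match PySem.List.pyGet? cs idx with
    | some c => c :: caesarGather cs col (idx + col)
    | none => []
  else []
termination_by ((cs.length : Int) - idx).toNat
decreasing_by omega

def caesar_box_encrypt (plaintext : String) (column : Int) : String :=
  if column = 1 then plaintext
  else
    String.ofList ((PySem.List.pyRange 0 column 1).foldl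
      (fun ciphertext i => ciphertext ++ caesarGather plaintext.toList column i) [])

-- ===== PORT B =====
-- Source B: scatter each character into bucket i % column in one pass, then ''.join.
def caesar_box_encrypt_alt (plaintext : String) (column : Int) : String :=
  if column < 1 then ""
  else
    String.ofList (PySem.Chars.join []
      ((plaintext.toList.foldl
        (fun (st : List (List Char) × Int) ch =>
          (st.1.modify (PySem.Int.mod st.2 column).toNat (fun b => b ++ [ch]), st.2 + 1))
        (List.replicate column.toNat [], 0)).1))

-- ===== PRECONDITION & SPEC =====
def Spec_caesar_box_encrypt (plaintext : String) (column : Int) (out : String) : Prop := out = caesar_box_encrypt_alt plaintext column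
instance (plaintext : String) (column : Int) (out : String) : Decidable (Spec_caesar_box_encrypt plaintext column out) := by unfold Spec_caesar_box_encrypt; infer_instance

-- ===== CLAIM (what is proved, stated in full; the proofs are below) =====
def Claim_equal_caesar_box_encrypt : Prop := ∀ (plaintext : String) (column : Int), Dom_caesar_box_encrypt plaintext column → Spec_caesar_box_encrypt plaintext column (caesar_box_encrypt plaintext column)

-- ===== LEMMAS AND PROOFS =====

-- `bucketF n cs t j`: the characters of `cs` whose absolute position p (positions start
-- at t) satisfies p % n = j — the common characterisation both ports are reduced to.
def bucketF (n : Nat) (cs : List Char) (t : Nat) (j : Nat) : List Char :=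
  match cs with
  | [] => []
  | c :: cs => (if t % n = j then [c] else []) ++ bucketF n cs (t + 1) j

theorem bucketF_append (n : Nat) (xs ys : List Char) (t j : Nat) :
    bucketF n (xs ++ ys) t j = bucketF n xs t j ++ bucketF n ys (t + xs.length) j := by
  induction xs generalizing t with
  | nil => simp [bucketF]
  | cons c xs ih => simp [bucketF, ih, Nat.add_assoc, Nat.add_comm 1 xs.length]

theorem bucketF_nil_of (n : Nat) (cs : List Char) (t j : Nat)
    (h : ∀ p < cs.length, (t + p) % n ≠ j) : bucketF n cs t j = [] := by
  induction cs generalizing t with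
  | nil => rfl
  | cons c cs ih =>
    have h0 := h 0 (by simp)
    simp only [Nat.add_zero] at h0
    simp only [bucketF, h0, if_false, List.nil_append]
    exact ih (t + 1) (fun p hp => by
      have := h (p + 1) (by simpa using Nat.succ_lt_succ hp)
      simpa [Nat.add_assoc, Nat.add_comm 1 p] using this)

-- no other position in the same window of n hits the same residue
theorem mod_add_ne (t r n : Nat) (h0 : 0 < r) (hr : r < n) : (t + r) % n ≠ t % n := by
  intro h
  have : n ∣ (t + r) - t := (Nat.modEq_iff_dvd' (Nat.le_add_right t r)).mp h.symm
  simp only [Nat.add_sub_cancel_left] at this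
  exact absurd (Nat.le_of_dvd h0 this) (by omega)

-- A's inner while-loop computes exactly the bucket of residue idx % n
theorem caesarGather_eq_bucketF (n : Nat) (hn : 0 < n) (cs : List Char) :
    ∀ idx : Nat, caesarGather cs (n : Int) (idx : Int) = bucketF n (cs.drop idx) idx (idx % n) := by
  intro idx
  by_cases hlt : idx < cs.length
  · rw [caesarGather]
    have hget : PySem.List.pyGet? cs (idx : Int) = some cs[idx] := by
      simp [hlt]
    rw [dif_pos ⟨by exact_mod_cast hn, by positivity, by exact_mod_cast hlt⟩, hget]
    have hdrop : cs.drop idx = cs[idx] :: cs.drop (idx + 1) :=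
      List.drop_eq_getElem_cons hlt
    have hstep : ((idx : Int) + (n : Int)) = ((idx + n : Nat) : Int) := by exact_mod_cast rfl
    have ih := caesarGather_eq_bucketF n hn cs (idx + n)
    rw [hstep, ih]
    -- decompose cs.drop (idx+1) = seg ++ cs.drop (idx+n)
    have hsplit : cs.drop (idx + 1) =
        (cs.drop (idx + 1)).take (n - 1) ++ cs.drop (idx + n) := by
      conv_lhs => rw [← List.take_append_drop (n - 1) (cs.drop (idx + 1))]
      rw [List.drop_drop]
      have : idx + 1 + (n - 1) = idx + n := by omega
      rw [this]
    have hseg : bucketF n ((cs.drop (idx + 1)).take (n - 1)) (idx + 1) (idx % n) = [] := by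
      apply bucketF_nil_of
      intro p hp
      have hplen : p < n - 1 := lt_of_lt_of_le hp (by simp)
      have : idx + 1 + p = idx + (1 + p) := by omega
      rw [this]
      exact mod_add_ne idx (1 + p) n (by omega) (by omega)
    rw [hdrop]
    have hhead : bucketF n (cs[idx] :: cs.drop (idx + 1)) idx (idx % n)
        = cs[idx] :: bucketF n (cs.drop (idx + 1)) (idx + 1) (idx % n) := by
      simp [bucketF]
    rw [hhead, hsplit, bucketF_append, hseg, List.nil_append]
    by_cases hlen : idx + n ≤ cs.length
    · have hlseg : ((cs.drop (idx + 1)).take (n - 1)).length = n - 1 := by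
        simp only [List.length_take, List.length_drop]
        omega
      rw [hlseg]
      have h1 : idx + 1 + (n - 1) = idx + n := by omega
      have h2 : (idx + n) % n = idx % n := Nat.add_mod_right idx n
      rw [h1, h2]
    · have hnil : cs.drop (idx + n) = [] := by
        apply List.drop_eq_nil_of_le
        omega
      rw [hnil]
      rfl
  · rw [caesarGather]
    rw [dif_neg (by omega)]
    rw [List.drop_eq_nil_of_le (by omega)]
    rfl
termination_by idx => cs.length - idx
decreasing_by omega

-- skipping to the first position of residue j: bucket j of cs = gather starting at j
theorem bucketF_zero_eq_drop (n : Nat) (cs : List Char) (j : Nat) (hj : j < n) :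
    bucketF n cs 0 j = bucketF n (cs.drop j) j j := by
  by_cases hl : j ≤ cs.length
  · conv_lhs => rw [← List.take_append_drop j cs]
    rw [bucketF_append]
    have htake : bucketF n (cs.take j) 0 j = [] := by
      apply bucketF_nil_of
      intro p hp
      have hpj : p < j := lt_of_lt_of_le hp (by simp)
      simp only [Nat.zero_add]
      rw [Nat.mod_eq_of_lt (by omega)]
      omega
    rw [htake, List.nil_append, List.length_take, Nat.min_eq_left hl, Nat.zero_add]
  · rw [List.drop_eq_nil_of_le (by omega)]
    have : bucketF n cs 0 j = [] := by
      apply bucketF_nil_of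
      intro p hp
      simp only [Nat.zero_add]
      rw [Nat.mod_eq_of_lt (by omega)]
      omega
    rw [this]; rfl

-- B's scatter fold: each bucket accumulates its residue class
theorem scatter_invariant (n : Nat) (cs : List Char) :
    ∀ (B : List (List Char)) (t : Nat), B.length = n →
      (cs.foldl
        (fun (st : List (List Char) × Int) ch =>
          (st.1.modify (PySem.Int.mod st.2 (n : Int)).toNat (fun b => b ++ [ch]), st.2 + 1))
        (B, (t : Int))).1
      = B.mapIdx (fun j b => b ++ bucketF n cs t j) := by
  induction cs with
  | nil =>
    intro B t hB
    simp only [List.foldl_nil]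
    apply List.ext_getElem <;> simp [bucketF]
  | cons c cs ih =>
    intro B t hB
    have hmod : (PySem.Int.mod (t : Int) (n : Int)).toNat = t % n := by
      have := PySem.Int.mod_natCast t n
      rw [this]; omega
    have hcast : ((t : Int) + 1) = ((t + 1 : Nat) : Int) := by exact_mod_cast rfl
    simp only [List.foldl_cons, hmod, hcast]
    rw [ih (B.modify (t % n) (fun b => b ++ [c])) (t + 1) (by simpa using hB)]
    apply List.ext_getElem
    · simp
    · intro j h1 h2
      have hjn : j < n := by simpa [hB] using h2
      simp only [List.getElem_mapIdx, List.getElem_modify]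
      by_cases hje : t % n = j
      · simp [hje, bucketF, List.append_assoc]
      · simp [hje, bucketF]

-- with n = 1 the single bucket is the whole text
theorem bucketF_one (cs : List Char) : ∀ t, bucketF 1 cs t 0 = cs := by
  induction cs with
  | nil => intro t; rfl
  | cons c cs ih => intro t; simp [bucketF, Nat.mod_one, ih]

theorem join_nil_eq_flatten (l : List (List Char)) : PySem.Chars.join [] l = l.flatten := by
  show List.intercalate [] l = l.flatten
  induction l with
  | nil => rfl
  | cons x xs ih =>
    cases xs with
    | nil => simp [List.intercalate]
    | cons y ys =>
      simp only [List.intercalate, List.intersperse, List.flatten_cons] at *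
      simp [ih]

theorem mapIdx_replicate_nil (n : Nat) (f : Nat → List Char) :
    (List.replicate n ([] : List Char)).mapIdx (fun j b => b ++ f j)
      = (List.range n).map f := by
  apply List.ext_getElem <;> simp

-- B's value, for 1 ≤ column, as the flattened residue buckets
theorem alt_eq_buckets (plaintext : String) (n : Nat) (hn : 0 < n) :
    caesar_box_encrypt_alt plaintext (n : Int)
      = String.ofList (((List.range n).map (fun j => bucketF n plaintext.toList 0 j)).flatten) := by
  unfold caesar_box_encrypt_alt
  rw [if_neg (by exact_mod_cast Nat.not_lt.mpr hn)]
  have h0 : ((0 : Int) = ((0 : Nat) : Int)) := rfl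
  rw [h0, scatter_invariant n plaintext.toList (List.replicate ((n : Int)).toNat []) 0 (by simp)]
  rw [join_nil_eq_flatten]
  have : ((n : Int)).toNat = n := by simp
  rw [this, mapIdx_replicate_nil]

-- ===== VERDICT (by name: the statement is the Claim_ definition above) =====
theorem caesar_box_encrypt_spec : Claim_equal_caesar_box_encrypt := by
  intro plaintext column _
  unfold Spec_caesar_box_encrypt
  by_cases hpos : 1 ≤ column
  · obtain ⟨n, hn⟩ : ∃ n : Nat, column = (n : Int) := ⟨column.toNat, by omega⟩
    have hn1 : 1 ≤ n := by omega
    subst hn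
    rw [alt_eq_buckets plaintext n (by omega)]
    unfold caesar_box_encrypt
    by_cases h1 : (n : Int) = 1
    · have : n = 1 := by omega
      subst this
      rw [if_pos h1]
      simp [bucketF_one, String.ofList_toList]
    · rw [if_neg h1]
      rw [PySem.List.pyRange_one]
      rw [PySem.List.foldl_append_eq_flatMap, List.nil_append]
      congr 1
      rw [List.flatMap_def]
      simp only [List.map_map]
      congr 1
      apply List.map_congr_left
      intro k hk
      have hkn : k < n := by
        simp only [List.mem_range] at hk
        omega
      have : ((0 : Int) + (k : Int)) = ((k : Nat) : Int) := by ring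
      simp only [Function.comp_apply, this]
      rw [caesarGather_eq_bucketF n (by omega) plaintext.toList k]
      rw [Nat.mod_eq_of_lt hkn]
      exact (bucketF_zero_eq_drop n plaintext.toList k hkn).symm
  · -- column ≤ 0: A's range is empty, B's guard fires
    unfold caesar_box_encrypt caesar_box_encrypt_alt
    rw [if_neg (by omega), if_pos (by omega)]
    rw [PySem.List.pyRange_one_eq_nil (by omega)]
    rfl
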